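-- pv_equiv track=rewrite | github.com/shinkeonkim/BOJ | 04000~04999/4800~4899/4848.py | to_s
-- ===== SOURCE A (Python) =====
-- def to_s(n):
--   if n == 0:
--     return '{}'
--
--   ret = '{'
--   for i in range(n):
--     ret += to_s(i)
--     if i != n - 1:
--       ret += ','
--   ret += '}'
--
--   return ret
-- ===== SOURCE B (Python) =====
-- def to_s(n):
--     # Iterative instead of recursive: maintain the comma-joined body
--     # ','.join(to_s(0), ..., to_s(k-1)); each step appends ',{'+body+'}'.
--     if n <= 0:
--         return '{}'
--     body = '{}'
--     for _ in range(n - 1):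
--         body = body + ',{' + body + '}'
--     return '{' + body + '}'
-- ===== Notes on version B (the rewrite author's own statement) =====
-- stated objective: faster
-- what changed: Replaces the recursive re-computation of every to_s(i) inside the loop by a single iterative pass that maintains the comma-joined body string, so each prefix result is built exactly once.
import Mathlib
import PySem

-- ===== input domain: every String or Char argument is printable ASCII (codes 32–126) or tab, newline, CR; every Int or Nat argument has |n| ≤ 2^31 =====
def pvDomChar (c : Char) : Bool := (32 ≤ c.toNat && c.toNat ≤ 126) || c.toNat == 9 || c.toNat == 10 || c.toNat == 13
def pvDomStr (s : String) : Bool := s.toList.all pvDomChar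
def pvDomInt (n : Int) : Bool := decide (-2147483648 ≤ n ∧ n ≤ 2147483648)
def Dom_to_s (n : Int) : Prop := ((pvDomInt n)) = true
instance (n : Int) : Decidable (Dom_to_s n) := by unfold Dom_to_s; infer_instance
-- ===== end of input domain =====

-- B replaces A's exponential recursive re-computation by one iterative pass over an accumulator (faster).

-- ===== PORT A =====
def to_s (n : Int) : String :=
  if n = 0 then "{}"
  else
    ((PySem.List.pyRange 0 n 1).attach.foldl
      (fun ret i =>
        let r := ret ++ to_s i.1
        if i.1 ≠ n - 1 then r ++ "," else r) "{") ++ "}"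
termination_by n.toNat
decreasing_by
  have h := (PySem.List.mem_pyRange_one.mp i.2)
  omega

-- ===== PORT B =====
def to_s_alt (n : Int) : String :=
  if n ≤ 0 then "{}"
  else "{" ++ (List.range (n - 1).toNat).foldl (fun body _ => body ++ ",{" ++ body ++ "}") "{}" ++ "}"

-- ===== PRECONDITION & SPEC =====
def Spec_to_s (n : Int) (out : String) : Prop := out = to_s_alt n
instance (n : Int) (out : String) : Decidable (Spec_to_s n out) := by unfold Spec_to_s; infer_instance

-- ===== CLAIM (what is proved, stated in full; the proofs are below) =====
def Claim_equal_to_s : Prop := ∀ (n : Int), Dom_to_s n → Spec_to_s n (to_s n)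

-- ===== LEMMAS AND PROOFS =====

-- B's accumulator after k loop iterations
def pvBody (k : Nat) : String :=
  (List.range k).foldl (fun body _ => body ++ ",{" ++ body ++ "}") "{}"

lemma pvBody_succ (k : Nat) : pvBody (k + 1) = pvBody k ++ ",{" ++ pvBody k ++ "}" := by
  simp [pvBody, List.range_succ]

-- A's loop with the comma always appended (the prefix of the loop, where i ≠ n - 1)
def pvG (k : Nat) : String :=
  (PySem.List.pyRange 0 k 1).foldl (fun ret i => ret ++ to_s i ++ ",") "{"

lemma to_s_unfold (n : Int) (hn : n ≠ 0) :
    to_s n = ((PySem.List.pyRange 0 n 1).foldl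
      (fun ret i => let r := ret ++ to_s i; if i ≠ n - 1 then r ++ "," else r) "{") ++ "}" := by
  rw [to_s]
  simp [hn]

lemma to_s_split (k : Nat) :
    to_s ((k : Int) + 1) = pvG k ++ to_s k ++ "}" := by
  rw [to_s_unfold ((k : Int) + 1) (by omega)]
  have hsplit : PySem.List.pyRange 0 ((k : Int) + 1) 1
      = PySem.List.pyRange 0 (k : Int) 1 ++ [(k : Int)] := by
    simpa using PySem.List.pyRange_one_succ_right (a := 0) (b := (k : Int)) (by omega)
  rw [hsplit, List.foldl_append]
  have hpref : (PySem.List.pyRange 0 (k : Int) 1).foldl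
      (fun ret i => let r := ret ++ to_s i; if i ≠ (k : Int) + 1 - 1 then r ++ "," else r) "{"
      = pvG k := by
    unfold pvG
    apply PySem.List.foldl_congr_mem
    intro a x hx
    have hxk := (PySem.List.mem_pyRange_one.mp hx).2
    simp only []
    rw [if_pos (by omega)]
  rw [hpref]
  simp

lemma pvG_key : ∀ k : Nat, pvG k ++ to_s k = "{" ++ pvBody k := by
  intro k
  induction k with
  | zero =>
      have h0 : to_s 0 = "{}" := by rw [to_s]; rfl
      have hg : pvG 0 = "{" := by
        unfold pvG
        rw [PySem.List.pyRange_one_eq_nil (by omega)]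
        rfl
      simp only [Nat.cast_zero]
      rw [h0, hg]
      rfl
  | succ k ih =>
      have hT : to_s ((k : Int) + 1) = "{" ++ pvBody k ++ "}" := by
        rw [to_s_split k, ih]
      have hG : pvG (k + 1) = pvG k ++ to_s k ++ "," := by
        unfold pvG
        have hsplit : PySem.List.pyRange 0 ((k : Int) + 1) 1
            = PySem.List.pyRange 0 (k : Int) 1 ++ [(k : Int)] := by
          simpa using PySem.List.pyRange_one_succ_right (a := 0) (b := (k : Int)) (by omega)
        push_cast
        rw [hsplit, List.foldl_append]
        simp
      have hlit : (",{" : String) = "," ++ "{" := rfl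
      calc pvG (k + 1) ++ to_s (((k : Nat) + 1 : Nat) : Int)
          = (pvG k ++ to_s k ++ ",") ++ to_s ((k : Int) + 1) := by
            rw [hG]; push_cast; rfl
        _ = ("{" ++ pvBody k ++ ",") ++ ("{" ++ pvBody k ++ "}") := by
            rw [ih, hT]
        _ = "{" ++ pvBody (k + 1) := by
            rw [pvBody_succ]
            simp only [String.append_assoc]
            rw [hlit, String.append_assoc]

lemma to_s_pos (k : Nat) : to_s ((k : Int) + 1) = "{" ++ pvBody k ++ "}" := by
  rw [to_s_split k, pvG_key k]

-- ===== VERDICT (by name: the statement is the Claim_ definition above) =====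
theorem to_s_spec : Claim_equal_to_s := by
  unfold Claim_equal_to_s Spec_to_s
  intro n _
  rcases lt_trichotomy n 0 with hlt | heq | hgt
  · -- n < 0 : A's loop body never runs, both return "{}"
    rw [to_s_unfold n (by omega), PySem.List.pyRange_one_eq_nil (by omega)]
    rw [to_s_alt, if_pos (le_of_lt hlt)]
    rfl
  · subst heq
    have h0 : to_s 0 = "{}" := by rw [to_s]; rfl
    rw [h0, to_s_alt]
    rfl
  · have hk : n = ((n - 1).toNat : Int) + 1 := by omega
    rw [hk, to_s_pos]
    simp only [to_s_alt, if_neg (by omega : ¬ (((n - 1).toNat : Int) + 1 ≤ 0))]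
    have : ((((n - 1).toNat : Int) + 1 - 1).toNat) = (n - 1).toNat := by omega
    rw [this]
    rfl
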